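-- pv_equiv track=rewrite | github.com/SweeRoty/fintell_lbs | geo_embedding/extractEdges.py | filterUnnecessaryData
-- ===== SOURCE A (Python) =====
-- def filterUnnecessaryData(t):
-- 	arr = list(t[1])
-- 	if len(arr) == 1:
-- 		return False
-- 	geo_set = set()
-- 	for _, geo_hash in arr:
-- 		geo_set.add(geo_hash)
-- 	if len(geo_set) == 1:
-- 		return False
-- 	return True
-- ===== SOURCE B (Python) =====
-- def filterUnnecessaryData(t):
--     arr = list(t[1])
--     if len(arr) == 1:
--         return False
--     if not arr:
--         return True
--     geos = [g for _, g in arr]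
--     return min(geos) != max(geos)
-- ===== Notes on version B (the rewrite author's own statement) =====
-- stated objective: alternative
-- what changed: Instead of accumulating all geohashes into a set and testing its cardinality, B projects out the geohashes and decides multiplicity by the order-theoretic fact that a nonempty list has more than one distinct element iff min != max.
import Mathlib
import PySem

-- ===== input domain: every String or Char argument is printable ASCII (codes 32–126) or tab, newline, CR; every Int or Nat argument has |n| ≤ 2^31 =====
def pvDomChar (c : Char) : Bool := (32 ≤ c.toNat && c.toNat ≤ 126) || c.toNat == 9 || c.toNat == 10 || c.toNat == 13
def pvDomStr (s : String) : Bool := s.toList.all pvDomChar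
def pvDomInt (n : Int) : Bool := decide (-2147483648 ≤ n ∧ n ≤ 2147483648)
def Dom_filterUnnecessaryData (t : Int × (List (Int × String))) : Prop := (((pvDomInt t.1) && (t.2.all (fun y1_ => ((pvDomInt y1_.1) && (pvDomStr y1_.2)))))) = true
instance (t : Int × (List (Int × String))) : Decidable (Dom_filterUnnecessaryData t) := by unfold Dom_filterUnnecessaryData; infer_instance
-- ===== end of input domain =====

-- B replaces A's set-accumulation-and-cardinality test by an order-theoretic one: project out
-- the geohashes and test min != max (a nonempty list has >1 distinct element iff min ≠ max).

-- ===== PORT A =====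
def filterUnnecessaryData (t : Int × (List (Int × String))) : Bool :=
  let arr := t.2
  if arr.length = 1 then false
  else
    let geoSet := arr.foldl (fun s p => PySem.Set.add s p.2) PySem.Set.empty
    if PySem.Set.len geoSet = 1 then false
    else true

-- ===== PORT B =====
def filterUnnecessaryData_alt (t : Int × (List (Int × String))) : Bool :=
  let arr := t.2
  if arr.length = 1 then false
  else if arr.isEmpty then true
  else
    let geos := arr.map (fun p => p.2)
    match PySem.List.min? geos (fun x => x), PySem.List.max? geos (fun x => x) with
    | some mn, some mx => mn != mx
    | _, _ => true   -- unreachable: geos is nonempty here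

-- ===== PRECONDITION & SPEC =====
def Spec_filterUnnecessaryData (t : Int × (List (Int × String))) (out : Bool) : Prop := out = filterUnnecessaryData_alt t
instance (t : Int × (List (Int × String))) (out : Bool) : Decidable (Spec_filterUnnecessaryData t out) := by unfold Spec_filterUnnecessaryData; infer_instance

-- ===== CLAIM (what is proved, stated in full; the proofs are below) =====
def Claim_equal_filterUnnecessaryData : Prop := ∀ (t : Int × (List (Int × String))), Dom_filterUnnecessaryData t → Spec_filterUnnecessaryData t (filterUnnecessaryData t)

-- ===== LEMMAS AND PROOFS =====

-- Set.add never shrinks the carrier list.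
theorem pv_foldl_add_length_le (l : List String) (s : PySem.Set String) :
    s.length ≤ (l.foldl PySem.Set.add s).length := by
  induction l generalizing s with
  | nil => simp
  | cons b l ih =>
    refine le_trans ?_ (ih (PySem.Set.add s b))
    simp only [PySem.Set.add]
    split <;> simp

-- The set built from a nonempty run has size 1 iff everything equals the first element.
theorem pv_foldl_add_singleton (l : List String) (a : String) :
    (l.foldl PySem.Set.add [a]).length = 1 ↔ ∀ b ∈ l, b = a := by
  induction l with
  | nil => simp
  | cons b l ih =>
    by_cases hb : b = a
    · subst hb
      have hba : PySem.Set.add [b] b = [b] := by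
        simp [PySem.Set.add, PySem.Set.contains]
      simpa [List.foldl_cons, hba] using ih
    · have hadd : PySem.Set.add [a] b = [a, b] := by
        simp only [PySem.Set.add, PySem.Set.contains, List.contains_cons, List.contains_nil]
        simp [hb]
      have hle : ([a, b] : List String).length ≤ ((l.foldl PySem.Set.add [a, b])).length :=
        pv_foldl_add_length_le l [a, b]
      constructor
      · intro h1
        exfalso
        rw [List.foldl_cons, hadd] at h1
        simp at hle
        omega
      · intro h
        exact absurd (h b (by simp)) hb

-- For a nonempty list, min = max iff every element equals the head.
theorem pv_min_eq_max_iff (l : List String) (a : String) (mn mx : String)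
    (hmn : PySem.List.min? (a :: l) (fun x => x) = some mn)
    (hmx : PySem.List.max? (a :: l) (fun x => x) = some mx) :
    (mn = mx) ↔ ∀ b ∈ l, b = a := by
  have hmnMem : mn ∈ a :: l := PySem.List.min?_mem hmn
  have hmxMem : mx ∈ a :: l := PySem.List.max?_mem hmx
  have hmnMin : ∀ y ∈ a :: l, mn ≤ y := by
    intro y hy; exact PySem.List.min?_isMin hmn y hy
  have hmxMax : ∀ y ∈ a :: l, y ≤ mx := by
    intro y hy; exact PySem.List.max?_isMax hmx y hy
  constructor
  · intro hEq b hb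
    have h1 : mn ≤ b := hmnMin b (by simp [hb])
    have h2 : b ≤ mx := hmxMax b (by simp [hb])
    have h3 : mn ≤ a := hmnMin a (by simp)
    have h4 : a ≤ mx := hmxMax a (by simp)
    rw [← hEq] at h2 h4
    have hbmn : b = mn := le_antisymm h2 h1
    have hamn : a = mn := le_antisymm h4 h3
    rw [hbmn, hamn]
  · intro hall
    have hA : ∀ y ∈ a :: l, y = a := by
      intro y hy
      rcases List.mem_cons.mp hy with h | h
      · exact h
      · exact hall y h
    rw [hA mn hmnMem, hA mx hmxMem]


-- ===== VERDICT (by name: the statement is the Claim_ definition above) =====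
theorem filterUnnecessaryData_spec : Claim_equal_filterUnnecessaryData := by
  intro t _
  unfold Spec_filterUnnecessaryData filterUnnecessaryData filterUnnecessaryData_alt
  obtain ⟨k, arr⟩ := t
  match arr with
  | [] => rfl
  | [x] => rfl
  | x :: y :: rest =>
    simp only [List.length_cons]
    have hlen : ¬ (rest.length + 1 + 1 = 1) := by omega
    simp only [if_neg hlen, List.isEmpty_cons, if_neg (by simp : ¬ ((false : Bool) = true))]
    have hmap : ((x :: y :: rest).map (fun p => p.2)) = x.2 :: ((y :: rest).map Prod.snd) := by
      simp
    set l := (y :: rest).map Prod.snd with hl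
    have hfold : ((x :: y :: rest).foldl (fun s p => PySem.Set.add s p.2) PySem.Set.empty)
        = l.foldl PySem.Set.add [x.2] := by
      simp [hl, List.foldl_map, List.foldl_cons, PySem.Set.empty, PySem.Set.add, PySem.Set.contains]
    rw [hfold, hmap]
    cases hmn : PySem.List.min? (x.2 :: l) (fun s => s) with
    | none => exact absurd (((PySem.List.min?_eq_none_iff _ _).mp hmn)) (by simp)
    | some mn =>
      cases hmx : PySem.List.max? (x.2 :: l) (fun s => s) with
      | none => exact absurd (((PySem.List.max?_eq_none_iff _ _).mp hmx)) (by simp)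
      | some mx =>
        simp only []
        by_cases hall : ∀ b ∈ l, b = x.2
        · have h1 : (l.foldl PySem.Set.add [x.2]).length = 1 :=
            (pv_foldl_add_singleton l x.2).mpr hall
          have hlen1 : PySem.Set.len (l.foldl PySem.Set.add [x.2]) = 1 := by
            simp only [PySem.Set.len, h1]; rfl
          have heq : mn = mx := (pv_min_eq_max_iff l x.2 mn mx hmn hmx).mpr hall
          rw [if_pos hlen1, heq]
          simp
        · have h1 : ¬ ((l.foldl PySem.Set.add [x.2]).length = 1) :=
            fun h => hall ((pv_foldl_add_singleton l x.2).mp h)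
          have hlen1 : ¬ (PySem.Set.len (l.foldl PySem.Set.add [x.2]) = 1) := by
            simp only [PySem.Set.len]; omega
          have hne : mn ≠ mx := fun h => hall ((pv_min_eq_max_iff l x.2 mn mx hmn hmx).mp h)
          rw [if_neg hlen1]
          simp [hne]
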